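-- pv_equiv track=rewrite | github.com/m4bulmagd/Advanced-Algorithms-JMU | edit-distance/modules.py | alignmentR
-- ===== SOURCE A (Python) =====
-- def alignmentR(str1, str2, alignment):
--     bibing = ""
--     for i in range(len(alignment)):
--         if alignment[i] == "S":
--             bibing = bibing + "_"
--         elif alignment[i] == "I":
--             bibing = bibing + "_"
--             str1 = str1[:i] + "*" + str1[i:]
--         elif alignment[i] == "R":
--             bibing = bibing + "_"
--             str2 = str2[:i] + "*" + str2[i:]
--         elif alignment[i] == "M":
--             bibing = bibing + "|"
--         else:
--             bibing = "SOMETHING WENT WRONG"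
--     return str1, str2, bibing
-- ===== SOURCE B (Python) =====
-- def alignmentR(str1, str2, alignment):
--     out1, out2, bib = [], [], []
--     p1 = p2 = 0
--     for c in alignment:
--         if c == "I":
--             out1.append("*")
--         elif p1 < len(str1):
--             out1.append(str1[p1])
--             p1 += 1
--         if c == "R":
--             out2.append("*")
--         elif p2 < len(str2):
--             out2.append(str2[p2])
--             p2 += 1
--         if c in ("S", "I", "R"):
--             bib.append("_")
--         elif c == "M":
--             bib.append("|")
--         else:
--             bib = list("SOMETHING WENT WRONG")
--     return "".join(out1) + str1[p1:], "".join(out2) + str2[p2:], "".join(bib)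
-- ===== Notes on version B (the rewrite author's own statement) =====
-- stated objective: alternative
-- what changed: Replaced A's repeated string slice-and-reinsert (str1 = str1[:i]+'*'+str1[i:]) on every insert/replace symbol by a single pointer-merge pass that keeps read cursors into the untouched originals and appends to output lists, joining once at the end.
import Mathlib
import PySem

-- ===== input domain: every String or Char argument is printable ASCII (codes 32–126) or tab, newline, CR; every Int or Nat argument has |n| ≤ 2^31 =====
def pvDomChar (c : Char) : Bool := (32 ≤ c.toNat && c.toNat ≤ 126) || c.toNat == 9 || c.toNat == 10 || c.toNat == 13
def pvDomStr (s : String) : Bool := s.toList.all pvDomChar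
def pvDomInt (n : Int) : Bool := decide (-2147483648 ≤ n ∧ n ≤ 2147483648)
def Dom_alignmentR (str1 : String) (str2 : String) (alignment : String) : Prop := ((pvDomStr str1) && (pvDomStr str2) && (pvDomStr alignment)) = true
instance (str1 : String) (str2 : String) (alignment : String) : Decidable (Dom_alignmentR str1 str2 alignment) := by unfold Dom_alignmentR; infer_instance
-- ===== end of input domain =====

-- B replaces A's repeated slice-and-reinsert of '*' markers by a single
-- pointer-merge pass with read cursors into the untouched originals
-- (a different algorithm; equivalence proved below).


-- ===== PORT A =====
-- one iteration of A's loop body; `i` is the range index, `al` the (unchanged)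
-- alignment; alignment[i] is exact via getD since i < al.length on every call;
-- str1[:i] / str1[i:] with 0 ≤ i are exactly List.take i / List.drop i.
def pvStepA (al : List Char) (st : List Char × List Char × List Char) (i : Nat) :
    List Char × List Char × List Char :=
  let c := al.getD i ' '
  if c = 'S' then (st.1, st.2.1, st.2.2 ++ ['_'])
  else if c = 'I' then (st.1.take i ++ '*' :: st.1.drop i, st.2.1, st.2.2 ++ ['_'])
  else if c = 'R' then (st.1, st.2.1.take i ++ '*' :: st.2.1.drop i, st.2.2 ++ ['_'])
  else if c = 'M' then (st.1, st.2.1, st.2.2 ++ ['|'])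
  else (st.1, st.2.1, "SOMETHING WENT WRONG".toList)

def alignmentR (str1 : String) (str2 : String) (alignment : String) : String × String × String :=
  let al := alignment.toList
  let r := (List.range al.length).foldl (pvStepA al) (str1.toList, str2.toList, [])
  (String.ofList r.1, String.ofList r.2.1, String.ofList r.2.2)

-- ===== PORT B =====
-- one iteration of B's loop: state is (out1, p1, out2, p2, bib); s1[p1] is exact
-- via getD since it is only read under p1 < s1.length.
def pvStepB (s1 s2 : List Char) (st : List Char × Nat × List Char × Nat × List Char)
    (c : Char) : List Char × Nat × List Char × Nat × List Char :=
  let q1 := if c = 'I' then (st.1 ++ ['*'], st.2.1)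
            else if st.2.1 < s1.length then (st.1 ++ [s1.getD st.2.1 ' '], st.2.1 + 1)
            else (st.1, st.2.1)
  let q2 := if c = 'R' then (st.2.2.1 ++ ['*'], st.2.2.2.1)
            else if st.2.2.2.1 < s2.length then (st.2.2.1 ++ [s2.getD st.2.2.2.1 ' '], st.2.2.2.1 + 1)
            else (st.2.2.1, st.2.2.2.1)
  let bib := if c = 'S' ∨ c = 'I' ∨ c = 'R' then st.2.2.2.2 ++ ['_']
             else if c = 'M' then st.2.2.2.2 ++ ['|']
             else "SOMETHING WENT WRONG".toList
  (q1.1, q1.2, q2.1, q2.2, bib)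

def alignmentR_alt (str1 : String) (str2 : String) (alignment : String) : String × String × String :=
  let s1 := str1.toList
  let s2 := str2.toList
  let r := alignment.toList.foldl (pvStepB s1 s2) ([], 0, [], 0, [])
  (String.ofList (r.1 ++ s1.drop r.2.1), String.ofList (r.2.2.1 ++ s2.drop r.2.2.2.1),
   String.ofList r.2.2.2.2)

-- ===== PRECONDITION & SPEC =====
def Spec_alignmentR (str1 : String) (str2 : String) (alignment : String) (out : String × String × String) : Prop := out = alignmentR_alt str1 str2 alignment
instance (str1 : String) (str2 : String) (alignment : String) (out : String × String × String) : Decidable (Spec_alignmentR str1 str2 alignment out) := by unfold Spec_alignmentR; infer_instance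

-- ===== CLAIM (what is proved, stated in full; the proofs are below) =====
def Claim_equal_alignmentR : Prop := ∀ (str1 : String) (str2 : String) (alignment : String), Dom_alignmentR str1 str2 alignment → Spec_alignmentR str1 str2 alignment (alignmentR str1 str2 alignment)

-- ===== LEMMAS AND PROOFS =====

-- invariant for one side: A's current string equals B's output so far plus the
-- unread tail of the original; while the original is not exhausted the output
-- has exactly one char per processed symbol (so inserting at index i lands
-- exactly at the end of the output-so-far).
def pvSideInv (s1 : List Char) (i : Nat) (cur o1 : List Char) (p1 : Nat) : Prop :=
  cur = o1 ++ s1.drop p1 ∧ p1 ≤ s1.length ∧ o1.length ≤ i ∧ (o1.length = i ∨ p1 = s1.length)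

def pvInv (s1 s2 : List Char) (i : Nat) (stA : List Char × List Char × List Char)
    (stB : List Char × Nat × List Char × Nat × List Char) : Prop :=
  pvSideInv s1 i stA.1 stB.1 stB.2.1 ∧ pvSideInv s2 i stA.2.1 stB.2.2.1 stB.2.2.2.1 ∧
    stA.2.2 = stB.2.2.2.2

-- the 'I'/'R' branch: slice-insert at i equals appending '*' to the output
lemma pvSide_insert {s1 : List Char} {i : Nat} {cur o1 : List Char} {p1 : Nat}
    (h : pvSideInv s1 i cur o1 p1) :
    pvSideInv s1 (i + 1) (cur.take i ++ '*' :: cur.drop i) (o1 ++ ['*']) p1 := by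
  obtain ⟨hc, hp, hlen, hd⟩ := h
  have hlen' : (o1 ++ ['*']).length = o1.length + 1 := by simp
  have key : cur.take i ++ '*' :: cur.drop i = (o1 ++ ['*']) ++ s1.drop p1 := by
    rcases hd with hoi | hpl
    · subst hc
      rw [← hoi, List.take_left, List.drop_left]
      simp
    · have htail : s1.drop p1 = [] := by
        apply List.drop_eq_nil_of_le; omega
      rw [htail] at hc ⊢
      subst hc
      simp only [List.append_nil]
      simp [List.take_of_length_le hlen, List.drop_eq_nil_of_le hlen]
  refine ⟨key, hp, by omega, ?_⟩
  rcases hd with hoi | hpl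
  · left; omega
  · right; exact hpl

-- any non-'I' (resp. non-'R') branch: A leaves the string untouched, B moves
-- one char (if any is left) from the unread tail to the output; stated in the
-- exact shape of pvStepB's conditional pair
lemma pvSide_keep {s1 : List Char} {i : Nat} {cur o1 : List Char} {p1 : Nat}
    (h : pvSideInv s1 i cur o1 p1) :
    pvSideInv s1 (i + 1) cur
      (if p1 < s1.length then (o1 ++ [s1.getD p1 ' '], p1 + 1) else (o1, p1)).1
      (if p1 < s1.length then (o1 ++ [s1.getD p1 ' '], p1 + 1) else (o1, p1)).2 := by
  obtain ⟨hc, hp, hlen, hd⟩ := h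
  split
  · next hlt =>
    have hget : s1.getD p1 ' ' = s1[p1] := List.getD_eq_getElem s1 ' ' hlt
    have hdrop : s1.drop p1 = s1[p1] :: s1.drop (p1 + 1) := List.drop_eq_getElem_cons hlt
    have hlen' : (o1 ++ [s1.getD p1 ' ']).length = o1.length + 1 := by simp
    have hoi : o1.length = i := by rcases hd with h' | h' <;> [exact h'; omega]
    refine ⟨?_, ?_, ?_, ?_⟩
    · show cur = (o1 ++ [s1.getD p1 ' ']) ++ s1.drop (p1 + 1)
      rw [hc, hdrop, hget]; simp
    · show p1 + 1 ≤ s1.length; omega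
    · show (o1 ++ [s1.getD p1 ' ']).length ≤ i + 1; omega
    · left
      show (o1 ++ [s1.getD p1 ' ']).length = i + 1; omega
  · next hge =>
    refine ⟨hc, hp, ?_, Or.inr ?_⟩
    · show o1.length ≤ i + 1; omega
    · show p1 = s1.length; omega

-- one full loop iteration preserves the invariant
lemma pvStep_inv {s1 s2 al : List Char} {i : Nat} {stA : List Char × List Char × List Char}
    {stB : List Char × Nat × List Char × Nat × List Char}
    (hi : i < al.length) (h : pvInv s1 s2 i stA stB) :
    pvInv s1 s2 (i + 1) (pvStepA al stA i) (pvStepB s1 s2 stB al[i]) := by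
  obtain ⟨h1, h2, hb⟩ := h
  have hget : al.getD i ' ' = al[i] := List.getD_eq_getElem al ' ' hi
  by_cases hS : al[i] = 'S'
  · simp only [pvStepA, pvStepB, hget, hS, Char.reduceEq, if_true, if_false]
    exact ⟨pvSide_keep h1, pvSide_keep h2, by simpa using hb⟩
  by_cases hI : al[i] = 'I'
  · simp only [pvStepA, pvStepB, hget, hI, Char.reduceEq, if_true, if_false]
    exact ⟨pvSide_insert h1, pvSide_keep h2, by simpa using hb⟩
  by_cases hR : al[i] = 'R'
  · simp only [pvStepA, pvStepB, hget, hR, Char.reduceEq, if_true, if_false]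
    exact ⟨pvSide_keep h1, pvSide_insert h2, by simpa using hb⟩
  by_cases hM : al[i] = 'M'
  · simp only [pvStepA, pvStepB, hget, hM, Char.reduceEq, if_true, if_false]
    exact ⟨pvSide_keep h1, pvSide_keep h2, by simpa using hb⟩
  · simp only [pvStepA, pvStepB, hget, if_neg hS, if_neg hI, if_neg hR, if_neg hM,
      if_neg (by simp [hS, hI, hR] : ¬ (al[i] = 'S' ∨ al[i] = 'I' ∨ al[i] = 'R'))]
    exact ⟨pvSide_keep h1, pvSide_keep h2, rfl⟩

-- the two folds, run in lockstep from any invariant-related states, end related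
lemma pvMain (s1 s2 al : List Char) :
    ∀ (k i : Nat) (stA : List Char × List Char × List Char)
      (stB : List Char × Nat × List Char × Nat × List Char),
      i + k = al.length → pvInv s1 s2 i stA stB →
      (let rA := (List.range' i k).foldl (pvStepA al) stA
       let rB := (al.drop i).foldl (pvStepB s1 s2) stB
       rA.1 = rB.1 ++ s1.drop rB.2.1 ∧ rA.2.1 = rB.2.2.1 ++ s2.drop rB.2.2.2.1 ∧
         rA.2.2 = rB.2.2.2.2) := by
  intro k
  induction k with
  | zero =>
    intro i stA stB hk h
    obtain ⟨⟨hc1, _⟩, ⟨hc2, _⟩, hb⟩ := h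
    have : al.drop i = [] := List.drop_eq_nil_of_le (by omega)
    simp [this, hc1, hc2, hb]
  | succ k ih =>
    intro i stA stB hk h
    have hi : i < al.length := by omega
    have hdrop : al.drop i = al[i] :: al.drop (i + 1) := List.drop_eq_getElem_cons hi
    have hrange : List.range' i (k + 1) = i :: List.range' (i + 1) k := by
      simp [List.range'_succ]
    rw [hrange, hdrop]
    simp only [List.foldl_cons]
    exact ih (i + 1) _ _ (by omega) (pvStep_inv hi h)

lemma pvInv_init (s1 s2 : List Char) :
    pvInv s1 s2 0 (s1, s2, []) ([], 0, [], 0, []) := by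
  refine ⟨⟨by simp, by simp, by simp, Or.inl rfl⟩,
          ⟨by simp, by simp, by simp, Or.inl rfl⟩, rfl⟩

-- ===== VERDICT (by name: the statement is the Claim_ definition above) =====
theorem alignmentR_spec : Claim_equal_alignmentR := by
  intro str1 str2 alignment _
  unfold Spec_alignmentR alignmentR alignmentR_alt
  have h := pvMain str1.toList str2.toList alignment.toList alignment.toList.length 0
      (str1.toList, str2.toList, []) ([], 0, [], 0, []) (by omega)
      (pvInv_init str1.toList str2.toList)
  rw [← List.range_eq_range'] at h
  simp only [List.drop_zero] at h
  obtain ⟨h1, h2, h3⟩ := h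
  simp only [h1, h2, h3]
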